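-- pv_equiv track=rewrite | github.com/yuan-shuo/JiKeng | utils.py | soil_cal
-- ===== SOURCE A (Python) =====
-- def soil_cal(obj, totalDeep, digDeep, frontfc=[]):
--     detect_deepth = 0
--     obj_1 = []
--     for i in obj:
--         obj_1.append(i.copy())
--     for i in range(len(obj_1)):
--         if i:
--             obj_1[i]['l'] += obj_1[i-1]['l']
--     cor_index = 0
--     de_deep = 0
--     for i in obj_1:
--         if digDeep <= i['l']:
--             de_deep = i['l'] - digDeep
--             break
--         cor_index += 1
--
--     # 计算开挖面一下土层信息
--     obj_down = obj[cor_index:]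
--     obj_down[0]['l'] = de_deep
--     return obj_down, totalDeep, frontfc
-- ===== SOURCE B (Python) =====
-- def soil_cal(obj, totalDeep, digDeep, frontfc=[]):
--     # single accumulating scan: no copied list, no prefix-sum table
--     acc = 0
--     cor_index = len(obj)
--     de_deep = 0
--     for idx, layer in enumerate(obj):
--         acc += layer['l']
--         if digDeep <= acc:
--             cor_index = idx
--             de_deep = acc - digDeep
--             break
--     obj_down = obj[cor_index:]
--     obj_down[0]['l'] = de_deep
--     return obj_down, totalDeep, frontfc
-- ===== Notes on version B (the rewrite author's own statement) =====
-- stated objective: simpler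
-- what changed: B replaces A's two-phase work (copy every dict, build an in-place prefix-sum table, then rescan it) with one accumulating enumerate pass over the original list; the copies and the prefix table disappear.
import Mathlib
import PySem

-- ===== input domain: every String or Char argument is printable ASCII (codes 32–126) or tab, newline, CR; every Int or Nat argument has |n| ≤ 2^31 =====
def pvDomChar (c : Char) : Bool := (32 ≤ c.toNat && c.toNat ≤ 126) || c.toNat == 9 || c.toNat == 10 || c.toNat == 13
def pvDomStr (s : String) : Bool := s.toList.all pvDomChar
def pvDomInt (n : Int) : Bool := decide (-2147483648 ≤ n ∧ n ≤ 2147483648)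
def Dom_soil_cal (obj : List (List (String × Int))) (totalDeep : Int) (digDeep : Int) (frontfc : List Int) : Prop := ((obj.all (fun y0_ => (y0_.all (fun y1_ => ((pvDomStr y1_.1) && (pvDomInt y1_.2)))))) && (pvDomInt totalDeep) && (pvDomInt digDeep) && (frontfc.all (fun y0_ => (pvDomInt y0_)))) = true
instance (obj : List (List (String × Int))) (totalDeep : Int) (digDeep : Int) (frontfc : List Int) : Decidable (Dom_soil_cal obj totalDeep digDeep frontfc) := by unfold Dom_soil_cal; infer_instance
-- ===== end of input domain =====

-- B replaces A's two passes (copy all dicts, build a prefix-sum table in place, rescan it) with one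
-- accumulating pass over the original list (objective: simpler). Both Pythons mutate the dict at the
-- found index in place (it is returned as obj_down[0]); the equivalence proved is about the return value.

-- shared dict primitives: d['l'] read (KeyError excluded by Pre_, so getD is exact) and d['l'] = v
def pvGetL (d : List (String × Int)) : Int := (PySem.Dict.mk d).getD "l" 0
def pvSetL (d : List (String × Int)) (v : Int) : List (String × Int) := ((PySem.Dict.mk d).insert "l" v).items

-- ===== PORT A =====
-- obj_1 = []; for i in obj: obj_1.append(i.copy())   (i.copy() of an assoc list is the list itself)
def soilCopy (obj : List (List (String × Int))) : List (List (String × Int)) :=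
  obj.foldl (fun acc i => acc ++ [i]) []

-- body of: for i in range(len(obj_1)): if i: obj_1[i]['l'] += obj_1[i-1]['l']
-- (i ranges over 0..len-1, so the nonnegative in-range indexing obj_1[i] is exactly List.getD/set)
def soilPrefixStep (acc : List (List (String × Int))) (i : Int) : List (List (String × Int)) :=
  if i ≠ 0 then
    let cur := acc.getD i.toNat []
    acc.set i.toNat (pvSetL cur (pvGetL cur + pvGetL (acc.getD (i - 1).toNat [])))
  else acc

-- cor_index = 0; de_deep = 0; for i in obj_1: if digDeep <= i['l']: de_deep = i['l'] - digDeep; break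
--                                             else: cor_index += 1
def soilFindA (l : List (List (String × Int))) (digDeep : Int) (ci : Nat) : Nat × Int :=
  match l with
  | [] => (ci, 0)
  | d :: rest =>
    if digDeep ≤ pvGetL d then (ci, pvGetL d - digDeep) else soilFindA rest digDeep (ci + 1)

def soil_cal (obj : List (List (String × Int))) (totalDeep : Int) (digDeep : Int) (frontfc : List Int) : (List (List (String × Int))) × Int × List Int :=
  let obj_1 := soilCopy obj
  let obj_2 := (PySem.List.pyRange 0 obj_1.length 1).foldl soilPrefixStep obj_1
  let fd := soilFindA obj_2 digDeep 0
  match obj.drop fd.1 with        -- obj_down = obj[cor_index:]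
  | [] => ([], totalDeep, frontfc)  -- Python raises IndexError at obj_down[0]; excluded by Pre_
  | h :: t => (pvSetL h fd.2 :: t, totalDeep, frontfc)

-- ===== PORT B =====
-- acc = 0; cor_index = len(obj); de_deep = 0
-- for idx, layer in enumerate(obj): acc += layer['l']; if digDeep <= acc: cor_index, de_deep = idx, acc - digDeep; break
def soilFindB (l : List (List (String × Int))) (digDeep acc : Int) (idx n : Nat) : Nat × Int :=
  match l with
  | [] => (n, 0)
  | layer :: rest =>
    let acc' := acc + pvGetL layer
    if digDeep ≤ acc' then (idx, acc' - digDeep) else soilFindB rest digDeep acc' (idx + 1) n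

def soil_cal_alt (obj : List (List (String × Int))) (totalDeep : Int) (digDeep : Int) (frontfc : List Int) : (List (List (String × Int))) × Int × List Int :=
  let fd := soilFindB obj digDeep 0 0 obj.length
  match obj.drop fd.1 with        -- obj_down = obj[cor_index:]
  | [] => ([], totalDeep, frontfc)  -- Python raises IndexError at obj_down[0]; excluded by Pre_
  | h :: t => (pvSetL h fd.2 :: t, totalDeep, frontfc)

-- ===== PRECONDITION & SPEC =====
-- A raises KeyError unless every layer dict has key 'l', and IndexError (empty slice) unless some
-- prefix sum of the 'l' values reaches digDeep; Pre_ excludes exactly those inputs.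
def Pre_soil_cal (obj : List (List (String × Int))) (totalDeep : Int) (digDeep : Int) (frontfc : List Int) : Prop :=
  (∀ d ∈ obj, (PySem.Dict.mk d).contains "l" = true) ∧
  (∃ i < obj.length, digDeep ≤ ((obj.take (i + 1)).map pvGetL).sum)
instance (obj : List (List (String × Int))) (totalDeep : Int) (digDeep : Int) (frontfc : List Int) : Decidable (Pre_soil_cal obj totalDeep digDeep frontfc) := by unfold Pre_soil_cal; infer_instance

def pvWitness_soil_cal : (List (List (String × Int))) × Int × Int × List Int :=
  ([[("l", 5)], [("l", 4)]], 9, 7, [1])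

def Spec_soil_cal (obj : List (List (String × Int))) (totalDeep : Int) (digDeep : Int) (frontfc : List Int) (out : (List (List (String × Int))) × Int × List Int) : Prop := out = soil_cal_alt obj totalDeep digDeep frontfc
instance (obj : List (List (String × Int))) (totalDeep : Int) (digDeep : Int) (frontfc : List Int) (out : (List (List (String × Int))) × Int × List Int) : Decidable (Spec_soil_cal obj totalDeep digDeep frontfc out) := by unfold Spec_soil_cal; infer_instance

-- ===== CLAIM (what is proved, stated in full; the proofs are below) =====
def Claim_equal_soil_cal : Prop := ∀ (obj : List (List (String × Int))) (totalDeep : Int) (digDeep : Int) (frontfc : List Int), Dom_soil_cal obj totalDeep digDeep frontfc → Pre_soil_cal obj totalDeep digDeep frontfc → Spec_soil_cal obj totalDeep digDeep frontfc (soil_cal obj totalDeep digDeep frontfc)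

-- ===== LEMMAS AND PROOFS =====

theorem soilCopy_eq (obj : List (List (String × Int))) : soilCopy obj = obj := by
  have h : ∀ (l acc : List (List (String × Int))), l.foldl (fun a i => a ++ [i]) acc = acc ++ l := by
    intro l
    induction l with
    | nil => simp
    | cons x xs ih => intro acc; simp [List.foldl, ih]
  simpa [soilCopy] using h obj []

theorem pvGetL_pvSetL (d : List (String × Int)) (v : Int) : pvGetL (pvSetL d v) = v := by
  show ((PySem.Dict.mk d).insert "l" v).getD "l" 0 = v
  simp [PySem.Dict.getD_insert_self]

-- the scan of A's third loop depends only on the 'l' values of the list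
def soilVals (l : List Int) (dig : Int) (ci : Nat) : Nat × Int :=
  match l with
  | [] => (ci, 0)
  | v :: rest => if dig ≤ v then (ci, v - dig) else soilVals rest dig (ci + 1)

-- the prefix sums that A's second loop writes into the table
def soilSums (l : List Int) (acc : Int) : List Int :=
  match l with
  | [] => []
  | v :: rest => (acc + v) :: soilSums rest (acc + v)

theorem findA_eq_vals (l : List (List (String × Int))) (dig : Int) (ci : Nat) :
    soilFindA l dig ci = soilVals (l.map pvGetL) dig ci := by
  induction l generalizing ci with
  | nil => rfl
  | cons d rest ih => simp only [soilFindA, soilVals, List.map]; split <;> simp [ih]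

theorem findB_eq_vals (l : List (List (String × Int))) (dig acc : Int) (idx n : Nat)
    (h : idx + l.length = n) :
    soilFindB l dig acc idx n = soilVals (soilSums (l.map pvGetL) acc) dig idx := by
  induction l generalizing acc idx with
  | nil => simp only [List.length_nil, Nat.add_zero] at h; simp [soilFindB, soilSums, soilVals, h]
  | cons d rest ih =>
    simp only [soilFindB, soilSums, soilVals, List.map]
    split
    · rfl
    · exact ih _ _ (by simpa [Nat.add_comm, Nat.add_left_comm] using h)

theorem length_soilSums (l : List Int) (acc : Int) : (soilSums l acc).length = l.length := by
  induction l generalizing acc with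
  | nil => rfl
  | cons v rest ih => simp [soilSums, ih]

theorem soilSums_getD (l : List Int) (acc : Int) (i : Nat) (h : i < l.length) :
    (soilSums l acc).getD i 0 = acc + (l.take (i + 1)).sum := by
  induction l generalizing acc i with
  | nil => simp at h
  | cons v rest ih =>
    cases i with
    | zero => simp [soilSums]
    | succ j =>
      have hj : j < rest.length := by simpa using h
      simp only [soilSums, List.getD_cons_succ, ih _ _ hj, List.take_succ_cons, List.sum_cons]
      ring

-- invariant of A's in-place prefix loop
theorem prefix_inv (obj : List (List (String × Int))) (k : Nat) (hk : k ≤ obj.length) :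
    ((PySem.List.pyRange 0 (k : Int) 1).foldl soilPrefixStep obj).length = obj.length ∧
    (∀ i, k ≤ i → ((PySem.List.pyRange 0 (k : Int) 1).foldl soilPrefixStep obj).getD i [] = obj.getD i []) ∧
    (∀ i, i < k → pvGetL (((PySem.List.pyRange 0 (k : Int) 1).foldl soilPrefixStep obj).getD i []) =
      (soilSums (obj.map pvGetL) 0).getD i 0) := by
  induction k with
  | zero =>
    rw [Nat.cast_zero, PySem.List.pyRange_one_eq_nil le_rfl]
    exact ⟨rfl, fun i _ => rfl, fun i hi => absurd hi (Nat.not_lt_zero i)⟩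
  | succ k ih =>
    have hk' : k ≤ obj.length := Nat.le_of_succ_le hk
    obtain ⟨hlen, hun, hv⟩ := ih hk'
    have hrange : PySem.List.pyRange 0 ((k + 1 : Nat) : Int) 1 =
        PySem.List.pyRange 0 (k : Int) 1 ++ [(k : Int)] := by
      push_cast
      exact PySem.List.pyRange_one_succ_right (by positivity)
    rw [hrange, List.foldl_append, List.foldl_cons, List.foldl_nil]
    set L := (PySem.List.pyRange 0 (k : Int) 1).foldl soilPrefixStep obj with hL
    by_cases hk0 : k = 0
    · subst hk0
      have hstep : soilPrefixStep L ((0 : Nat) : Int) = L := by simp [soilPrefixStep]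
      rw [hstep]
      refine ⟨hlen, fun i hi => hun i (Nat.le_of_succ_le hi), fun i hi => ?_⟩
      interval_cases i
      have h0 : 0 < obj.length := hk
      have h0m : 0 < (obj.map pvGetL).length := by simpa using h0
      rw [hun 0 le_rfl, soilSums_getD _ _ _ h0m,
        List.sum_take_succ _ _ h0m, List.getElem_map, List.getD_eq_getElem _ _ h0]
      simp
    · have hkInt : ((k : Int)) ≠ 0 := by exact_mod_cast hk0
      have hkl : k < obj.length := hk
      have hklL : k < L.length := by omega
      have hstep : soilPrefixStep L (k : Int) =
          L.set k (pvSetL (L.getD k []) (pvGetL (L.getD k []) + pvGetL (L.getD (k - 1) []))) := by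
        rw [soilPrefixStep, if_pos hkInt]
        have h1 : ((k : Int)).toNat = k := Int.toNat_natCast k
        have h2 : ((k : Int) - 1).toNat = k - 1 := by omega
        rw [h1, h2]
      rw [hstep]
      have hmlen : k < (obj.map pvGetL).length := by simpa using hkl
      refine ⟨by simp [hlen], fun i hi => ?_, fun i hi => ?_⟩
      · rw [List.getD_eq_getElem?_getD, List.getElem?_set_ne (by omega),
          ← List.getD_eq_getElem?_getD]
        exact hun i (by omega)
      · rcases Nat.lt_or_ge i k with hik | hik
        · rw [List.getD_eq_getElem?_getD, List.getElem?_set_ne (by omega),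
            ← List.getD_eq_getElem?_getD]
          exact hv i hik
        · have hieq : i = k := by omega
          subst hieq
          rw [List.getD_eq_getElem?_getD, List.getElem?_set_self hklL, Option.getD_some,
            pvGetL_pvSetL, hun i le_rfl]
          rcases Nat.eq_zero_or_pos i with h0 | hpos
          · exact absurd h0 hk0
          · have hi1 : i - 1 < (obj.map pvGetL).length := by omega
            rw [hv (i - 1) (by omega), soilSums_getD _ _ _ hi1, soilSums_getD _ _ _ hmlen,
              List.sum_take_succ _ _ hmlen, List.getElem_map, List.getD_eq_getElem _ _ hkl]
            have : i - 1 + 1 = i := by omega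
            rw [this]
            ring

theorem prefix_map (obj : List (List (String × Int))) :
    ((PySem.List.pyRange 0 (obj.length : Int) 1).foldl soilPrefixStep obj).map pvGetL =
      soilSums (obj.map pvGetL) 0 := by
  obtain ⟨hlen, -, hv⟩ := prefix_inv obj obj.length le_rfl
  set L := (PySem.List.pyRange 0 (obj.length : Int) 1).foldl soilPrefixStep obj with hL
  apply List.ext_getElem
  · simp [hlen, length_soilSums]
  · intro i h1 h2
    have hi : i < obj.length := by simpa [hlen] using h1
    have hiL : i < L.length := by omega
    have hiS : i < (soilSums (obj.map pvGetL) 0).length := by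
      rw [length_soilSums]; simpa using hi
    have := hv i hi
    rw [List.getD_eq_getElem _ _ hiL, List.getD_eq_getElem _ _ hiS] at this
    simpa using this

theorem soil_cal_eq (obj : List (List (String × Int))) (totalDeep digDeep : Int) (frontfc : List Int) :
    soil_cal obj totalDeep digDeep frontfc = soil_cal_alt obj totalDeep digDeep frontfc := by
  have h : soilFindA ((PySem.List.pyRange 0 ((soilCopy obj).length : Int) 1).foldl soilPrefixStep (soilCopy obj)) digDeep 0 = soilFindB obj digDeep 0 0 obj.length := by
    rw [soilCopy_eq, findA_eq_vals, prefix_map, findB_eq_vals obj digDeep 0 0 obj.length (by omega)]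
  simp only [soil_cal, soil_cal_alt, h]

-- ===== VERDICT (by name: the statement is the Claim_ definition above) =====
theorem soil_cal_spec : Claim_equal_soil_cal := by
  intro obj totalDeep digDeep frontfc _ _
  exact soil_cal_eq obj totalDeep digDeep frontfc
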